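-- pv_equiv track=rewrite | github.com/ropbear/ProjectEuler | ProjectEuler.py | primeID
-- ===== SOURCE A (Python) =====
-- import math
--
-- def list_divisors(n): #this can be improved upon, it's super slow dealing with ints that have 9 digits or more
-- 	dlist = []
-- 	for d in range(1,int(math.sqrt(n))+1):
-- 		if n%d == 0:
-- 			dlist.append(d)
-- 	return dlist
--
-- def primeID(n):
-- 	found = False
-- 	num = 0
-- 	count = 0
-- 	while found == False:
-- 		if list_divisors(num) == [1]:
-- 			count += 1
-- 			if count == n:
-- 				return num
-- 		num += 1
-- ===== SOURCE B (Python) =====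
-- def _is_odd_prime(m):
--     d = 3
--     while d * d <= m:
--         if m % d == 0:
--             return False
--         d += 2
--     return True
--
-- def primeID(n):
--     if n == 1:
--         return 1
--     if n == 2:
--         return 2
--     count = 2
--     num = 1
--     while True:
--         num += 2
--         if _is_odd_prime(num):
--             count += 1
--             if count == n:
--                 return num
-- ===== Notes on version B (the rewrite author's own statement) =====
-- stated objective: faster
-- what changed: Instead of building the full divisor list of every candidate and comparing it to [1], B hard-codes the answers 1 and 2, scans odd candidates only, and tests each with early-exit trial division by odd divisors.
import Mathlib
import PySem

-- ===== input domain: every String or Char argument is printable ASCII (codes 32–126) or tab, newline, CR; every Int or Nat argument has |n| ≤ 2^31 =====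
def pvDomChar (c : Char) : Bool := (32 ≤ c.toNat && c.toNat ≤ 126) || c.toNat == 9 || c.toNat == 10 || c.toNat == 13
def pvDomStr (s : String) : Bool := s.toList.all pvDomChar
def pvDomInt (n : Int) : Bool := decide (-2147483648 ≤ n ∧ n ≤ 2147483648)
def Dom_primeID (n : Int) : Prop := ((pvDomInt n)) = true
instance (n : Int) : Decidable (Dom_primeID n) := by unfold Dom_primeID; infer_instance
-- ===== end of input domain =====

-- B replaces A's full divisor-list build per candidate by early-exit odd trial division over
-- odd candidates only (answers 1 and 2 hard-coded); objective: faster.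
-- Both Pythons diverge for n ≤ 0 (count only grows and never equals n); Pre_ excludes exactly those inputs.
-- The unbounded while-loops are ported with a fuel argument that only totalises them: the fuel
-- budget num + 2 always reaches the next hit (Bertrand; proved in the lemmas below), so the
-- dead fuel-exhaustion branch is never taken on any input admitted by Pre_.

-- ===== PORT A =====
-- list_divisors(n): 'range(1, int(math.sqrt(n))+1)' is List.range' 1 (Nat.sqrt n); exact here
-- because int(math.sqrt(m)) = Nat.sqrt m for every m far below 2^52 (doubles are exact there).
def pvListDivisors (n : Nat) : List Nat :=
  (List.range' 1 (Nat.sqrt n)).foldl (fun dlist d => if n % d == 0 then dlist ++ [d] else dlist) []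

-- 'list_divisors(num) == [1]'
def pvDivCheck (n : Nat) : Bool := pvListDivisors n == [1]

-- A's 'while found == False' loop, its count carried as the countdown k = n - count - 1;
-- fuel (never exhausted on admitted inputs) only bounds the scan to the next hit
def pvLoopA (k num fuel : Nat) : Int :=
  if pvDivCheck num then
    if k = 0 then (num : Int) else pvLoopA (k - 1) (num + 1) (num + 2)
  else
    match fuel with
    | 0 => 0
    | f + 1 => pvLoopA k (num + 1) f
termination_by (k, fuel)
decreasing_by
  · exact Prod.Lex.left _ _ (Nat.sub_lt (Nat.pos_of_ne_zero (by assumption)) Nat.one_pos)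
  · exact Prod.Lex.right _ (Nat.lt_succ_self f)

-- for n ≤ 0 the Python loop never returns; the guard only makes the port total (Pre_ excludes n ≤ 0)
def primeID (n : Int) : Int := if 1 ≤ n then pvLoopA (n.toNat - 1) 0 1 else 0

-- ===== PORT B =====
-- _is_odd_prime's 'while d*d <= m' loop
def pvGoB (m d : Nat) : Bool :=
  if d * d ≤ m then (if m % d == 0 then false else pvGoB m (d + 2)) else true
termination_by m + 1 - d
decreasing_by
  have : d ≤ m ∨ d = 0 := by
    rcases Nat.eq_zero_or_pos d with h | h
    · right; exact h
    · left; exact le_trans (Nat.le_mul_of_pos_left d h) (by assumption)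
  omega

def pvIsOddPrime (m : Nat) : Bool := pvGoB m 3

-- B's 'while True' loop, its count carried as the countdown k = n - count - 1;
-- pvLoopB k num fuel tests num + 2, matching 'num += 2; if _is_odd_prime(num): ...';
-- fuel (never exhausted on admitted inputs) only bounds the scan to the next hit
def pvLoopB (k num fuel : Nat) : Int :=
  if pvIsOddPrime (num + 2) then
    if k = 0 then ((num + 2 : Nat) : Int) else pvLoopB (k - 1) (num + 2) (num + 4)
  else
    match fuel with
    | 0 => 0
    | f + 1 => pvLoopB k (num + 2) f
termination_by (k, fuel)
decreasing_by
  · exact Prod.Lex.left _ _ (Nat.sub_lt (Nat.pos_of_ne_zero (by assumption)) Nat.one_pos)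
  · exact Prod.Lex.right _ (Nat.lt_succ_self f)

-- for n ≤ 0 the Python loop never returns; the guard only makes the port total (Pre_ excludes n ≤ 0)
def primeID_alt (n : Int) : Int :=
  if n = 1 then 1
  else if n = 2 then 2
  else if 3 ≤ n then pvLoopB (n.toNat - 3) 1 1
  else 0

-- ===== PRECONDITION & SPEC =====
-- Pre_ excludes exactly n ≤ 0, where A's while-loop never terminates (count only grows and never equals n)
def Pre_primeID (n : Int) : Prop := 1 ≤ n
instance (n : Int) : Decidable (Pre_primeID n) := by unfold Pre_primeID; infer_instance
def pvWitness_primeID : Int := (4)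

def Spec_primeID (n : Int) (out : Int) : Prop := out = primeID_alt n
instance (n : Int) (out : Int) : Decidable (Spec_primeID n out) := by unfold Spec_primeID; infer_instance

-- ===== CLAIM (what is proved, stated in full; the proofs are below) =====
def Claim_equal_primeID : Prop := ∀ (n : Int), Dom_primeID n → Pre_primeID n → Spec_primeID n (primeID n)

-- ===== LEMMAS AND PROOFS =====

lemma pvListDivisors_eq (n : Nat) :
    pvListDivisors n = (List.range' 1 (Nat.sqrt n)).filter (fun d => n % d == 0) := by
  unfold pvListDivisors
  rw [PySem.List.foldl_append_if_eq_filter]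
  simp

-- A's test holds exactly on 1 and the primes
lemma pvDivCheck_iff (m : Nat) : pvDivCheck m = true ↔ (m = 1 ∨ m.Prime) := by
  unfold pvDivCheck
  rw [pvListDivisors_eq, beq_iff_eq]
  rcases Nat.eq_zero_or_pos m with h0 | hpos
  · subst h0
    simp [Nat.sqrt]
    exact fun h => absurd h Nat.not_prime_zero
  · have hs : 1 ≤ Nat.sqrt m := Nat.sqrt_pos.mpr hpos
    have hr : List.range' 1 (Nat.sqrt m) = 1 :: List.range' 2 (Nat.sqrt m - 1) := by
      rw [show Nat.sqrt m = (Nat.sqrt m - 1) + 1 from by omega, List.range'_succ]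
      norm_num
    rw [hr]
    simp only [List.filter_cons, Nat.mod_one, beq_self_eq_true, if_true]
    constructor
    · intro h
      have hnil : (List.range' 2 (Nat.sqrt m - 1)).filter (fun d => m % d == 0) = [] := by
        simpa using h
      rw [List.filter_eq_nil_iff] at hnil
      by_cases h1 : m = 1
      · exact Or.inl h1
      · right
        by_contra hnp
        have hq := Nat.minFac_prime h1
        have hqd := Nat.minFac_dvd m
        have hq2 : 2 ≤ m.minFac := hq.two_le
        have hqs : m.minFac ≤ Nat.sqrt m := by
          rw [Nat.le_sqrt]
          nlinarith [Nat.minFac_sq_le_self hpos hnp]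
        have hmem : m.minFac ∈ List.range' 2 (Nat.sqrt m - 1) := by
          rw [List.mem_range'_1]
          omega
        have hmod : m % m.minFac = 0 := Nat.mod_eq_zero_of_dvd hqd
        have := hnil _ hmem
        simp [hmod] at this
    · rintro (h1 | hp)
      · subst h1
        simp
      · have hnil : ∀ d ∈ List.range' 2 (Nat.sqrt m - 1), ¬ ((m % d == 0) = true) := by
          intro d hd
          rw [List.mem_range'_1] at hd
          simp only [beq_iff_eq]
          intro hmod
          have hdvd : d ∣ m := Nat.dvd_of_mod_eq_zero hmod
          have hlt : d < m := by
            have := Nat.sqrt_lt_self hp.one_lt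
            omega
          rcases (Nat.Prime.eq_one_or_self_of_dvd hp d hdvd) with h | h <;> omega
        rw [List.filter_eq_nil_iff.mpr hnil]

-- characterisation of B's trial-division loop
lemma pvGoB_iff (m d : Nat) :
    pvGoB m d = true ↔ ∀ e, d ≤ e → (e - d) % 2 = 0 → e * e ≤ m → ¬ m % e = 0 := by
  induction d using pvGoB.induct (m := m) with
  | case1 d hle hmod =>
    rw [pvGoB]
    simp only [hle, if_true, hmod, if_true]
    simp only [beq_iff_eq] at hmod
    constructor
    · intro h; cases h
    · intro h
      exact absurd hmod (h d le_rfl (by omega) hle)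
  | case2 d hle hmod ih =>
    rw [pvGoB]
    simp only [beq_iff_eq] at hmod
    simp only [hle, if_true, beq_iff_eq, hmod, if_false, ih]
    constructor
    · intro h e hde hpar hee
      rcases Nat.eq_or_lt_of_le hde with rfl | hlt
      · exact fun hc => hmod hc
      · exact h e (by omega) (by omega) hee
    · intro h e hde hpar hee
      exact h e (by omega) (by omega) hee
  | case3 d hle =>
    rw [pvGoB]
    simp only [hle, if_false]
    constructor
    · intro _ e hde hpar hee
      exact absurd (le_trans (Nat.mul_le_mul hde hde) hee) hle
    · intro _; trivial

-- on odd m ≥ 3 B's test is primality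
lemma pvIsOddPrime_iff (m : Nat) (hodd : m % 2 = 1) (h3 : 3 ≤ m) :
    pvIsOddPrime m = true ↔ m.Prime := by
  unfold pvIsOddPrime
  rw [pvGoB_iff]
  constructor
  · intro h
    by_contra hnp
    have hq := Nat.minFac_prime (by omega : m ≠ 1)
    have hqd := Nat.minFac_dvd m
    have hq2 : 2 ≤ m.minFac := hq.two_le
    have hqodd : m.minFac % 2 = 1 := by
      rcases Nat.mod_two_eq_zero_or_one m.minFac with he | ho
      · exfalso
        have h2 : (2 : Nat) ∣ m.minFac := Nat.dvd_of_mod_eq_zero he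
        have : (2 : Nat) ∣ m := dvd_trans h2 hqd
        omega
      · exact ho
    have hqq : m.minFac * m.minFac ≤ m := by
      nlinarith [Nat.minFac_sq_le_self (by omega : 0 < m) hnp]
    exact h m.minFac (by omega) (by omega) hqq (Nat.mod_eq_zero_of_dvd hqd)
  · intro hp e he3 hpar hee hmod
    have hdvd : e ∣ m := Nat.dvd_of_mod_eq_zero hmod
    rcases Nat.Prime.eq_one_or_self_of_dvd hp e hdvd with h | h
    · omega
    · subst h
      nlinarith

-- every even number ≥ 4 fails A's test
lemma pvDivCheck_even (j : Nat) : pvDivCheck (2 * j + 4) = false := by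
  rw [← Bool.not_eq_true, pvDivCheck_iff]
  rintro (h | h)
  · omega
  · have := (Nat.Prime.even_iff h).mp ⟨j + 2, by omega⟩
    omega

-- on odd candidates ≥ 3 the two tests agree
lemma pvChecks_agree (c : Nat) (hodd : c % 2 = 1) (h3 : 3 ≤ c) :
    pvDivCheck c = pvIsOddPrime c := by
  rw [Bool.eq_iff_iff, pvDivCheck_iff, pvIsOddPrime_iff c hodd h3]
  constructor
  · rintro (h | h)
    · omega
    · exact h
  · exact Or.inr

-- Bertrand: from any stage j + 1 of B's scan the next hit is at most j candidates away
lemma pvNextOdd (j : Nat) : ∃ i, i ≤ j ∧ pvIsOddPrime (2 * j + 5 + 2 * i) = true := by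
  obtain ⟨p, hpp, hlt, hle⟩ := Nat.exists_prime_lt_and_le_two_mul (2 * j + 3) (by omega)
  have hpodd : p % 2 = 1 := by
    rcases Nat.mod_two_eq_zero_or_one p with h | h
    · have := (Nat.Prime.even_iff hpp).mp (Nat.even_iff.mpr h)
      omega
    · exact h
  refine ⟨(p - (2 * j + 5)) / 2, by omega, ?_⟩
  have harith : 2 * j + 5 + 2 * ((p - (2 * j + 5)) / 2) = p := by omega
  rw [harith]
  exact (pvIsOddPrime_iff p hpodd (by omega)).mpr hpp

-- the core bridge: from an odd position on, A's scan over all numbers (evens failing)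
-- equals B's scan over odd numbers only, as long as each fuel covers the next hit
lemma pvLoop_bridge (k : Nat)
    (hk : ∀ j fA fB i, k ≠ 0 → i ≤ fB → 2 * i ≤ fA → pvIsOddPrime (2 * (j + i) + 3) = true →
      pvLoopA (k - 1) (2 * j + 3) fA = pvLoopB (k - 1) (2 * j + 1) fB) :
    ∀ i j fA fB, i ≤ fB → 2 * i ≤ fA → pvIsOddPrime (2 * (j + i) + 3) = true →
      pvLoopA k (2 * j + 3) fA = pvLoopB k (2 * j + 1) fB := by
  have tb : ∀ j fA fB, pvIsOddPrime (2 * j + 1 + 2) = true →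
      pvLoopA k (2 * j + 3) fA = pvLoopB k (2 * j + 1) fB := by
    intro j fA fB hc
    have hA : pvDivCheck (2 * j + 3) = true := by
      rw [pvChecks_agree (2 * j + 3) (by omega) (by omega)]
      simpa using hc
    rw [pvLoopA.eq_def, pvLoopB.eq_def]
    simp only [hA, hc, if_true]
    by_cases hk0 : k = 0
    · simp [hk0]
      omega
    · simp only [hk0, if_false]
      -- A now skips the even 2j+4, then both sit at stage j+1
      rw [pvLoopA.eq_def]
      have hE : pvDivCheck (2 * j + 3 + 1) = false := by
        simpa [show 2 * j + 3 + 1 = 2 * j + 4 from by omega] using pvDivCheck_even j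
      simp only [hE, Bool.false_eq_true, if_false]
      obtain ⟨i', hi', hm'⟩ := pvNextOdd j
      have := hk (j + 1) (2 * j + 4) (2 * j + 5) i' hk0 (by omega) (by omega)
        (by simpa [show 2 * (j + 1 + i') + 3 = 2 * j + 5 + 2 * i' from by omega] using hm')
      simpa [show 2 * j + 3 + 1 + 1 = 2 * (j + 1) + 3 from by omega,
             show 2 * j + 3 + 2 - 1 = 2 * j + 4 from by omega,
             show 2 * j + 1 + 2 = 2 * (j + 1) + 1 from by omega,
             show 2 * j + 1 + 4 = 2 * j + 5 from by omega] using this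
  intro i
  induction i with
  | zero =>
    intro j fA fB _ _ hm
    exact tb j fA fB (by simpa [show 2 * (j + 0) + 3 = 2 * j + 1 + 2 from by omega] using hm)
  | succ i ihn =>
    intro j fA fB hiB hiA hm
    by_cases hc : pvIsOddPrime (2 * j + 1 + 2) = true
    · exact tb j fA fB hc
    · have hcb : pvIsOddPrime (2 * j + 1 + 2) = false := by simpa using hc
      have hA : pvDivCheck (2 * j + 3) = false := by
        rw [pvChecks_agree (2 * j + 3) (by omega) (by omega)]
        simpa [show 2 * j + 3 = 2 * j + 1 + 2 from by omega] using hcb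
      rw [pvLoopA.eq_def, pvLoopB.eq_def]
      simp only [hA, hcb, Bool.false_eq_true, if_false]
      -- fuels are positive: i + 1 ≤ fB and 2(i+1) ≤ fA
      rcases fB with _ | fB'
      · omega
      rcases fA with _ | fA'
      · omega
      simp only []
      -- A also skips the even 2j+4
      rw [pvLoopA.eq_def]
      have hE : pvDivCheck (2 * j + 3 + 1) = false := by
        simpa [show 2 * j + 3 + 1 = 2 * j + 4 from by omega] using pvDivCheck_even j
      simp only [hE, Bool.false_eq_true, if_false]
      rcases fA' with _ | fA''
      · omega
      have := ihn (j + 1) fA'' fB' (by omega) (by omega)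
        (by simpa [show 2 * (j + 1 + i) + 3 = 2 * (j + (i + 1)) + 3 from by omega] using hm)
      simpa [show 2 * j + 3 + 1 + 1 = 2 * (j + 1) + 3 from by omega,
             show 2 * j + 1 + 2 = 2 * (j + 1) + 1 from by omega] using this

lemma pvLoop_eq (k j fA fB i : Nat) (hiB : i ≤ fB) (hiA : 2 * i ≤ fA)
    (hm : pvIsOddPrime (2 * (j + i) + 3) = true) :
    pvLoopA k (2 * j + 3) fA = pvLoopB k (2 * j + 1) fB := by
  induction k generalizing j fA fB i with
  | zero => exact pvLoop_bridge 0 (fun _ _ _ _ h => absurd rfl h) i j fA fB hiB hiA hm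
  | succ k ih =>
    exact pvLoop_bridge (k + 1)
      (fun j' fA' fB' i' _ h1 h2 h3 => by simpa using ih j' fA' fB' i' h1 h2 h3) i j fA fB hiB hiA hm

-- the first steps of A's scan, and B's first candidate, evaluated via the characterisations
lemma pvDivCheck_0 : pvDivCheck 0 = false := by
  rw [← Bool.not_eq_true, pvDivCheck_iff]
  rintro (h | h)
  · omega
  · exact Nat.not_prime_zero h

lemma pvDivCheck_1 : pvDivCheck 1 = true := (pvDivCheck_iff 1).mpr (Or.inl rfl)

lemma pvDivCheck_2 : pvDivCheck 2 = true := (pvDivCheck_iff 2).mpr (Or.inr Nat.prime_two)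

lemma pvIsOddPrime_3 : pvIsOddPrime 3 = true :=
  (pvIsOddPrime_iff 3 (by omega) le_rfl).mpr Nat.prime_three

-- ===== VERDICT (by name: the statement is the Claim_ definition above) =====
theorem primeID_spec : Claim_equal_primeID := by
  intro n _ hpre
  unfold Pre_primeID at hpre
  unfold Spec_primeID primeID primeID_alt
  rw [if_pos hpre]
  by_cases h1 : n = 1
  · subst h1
    norm_num [show (1 : Int).toNat = 1 from rfl]
    rw [pvLoopA.eq_def]
    norm_num [pvDivCheck_0]
    rw [pvLoopA.eq_def]
    norm_num [pvDivCheck_1]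
  · by_cases h2 : n = 2
    · subst h2
      norm_num [show (2 : Int).toNat = 2 from rfl]
      rw [pvLoopA.eq_def]
      norm_num [pvDivCheck_0]
      rw [pvLoopA.eq_def]
      norm_num [pvDivCheck_1]
      rw [pvLoopA.eq_def]
      norm_num [pvDivCheck_2]
    · have h3 : 3 ≤ n := by omega
      have ht : 3 ≤ n.toNat := by omega
      rw [if_neg h1, if_neg h2, if_pos h3]
      rw [pvLoopA.eq_def]
      norm_num [pvDivCheck_0]
      rw [pvLoopA.eq_def]
      norm_num [pvDivCheck_1, show n.toNat - 1 ≠ 0 from by omega]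
      rw [pvLoopA.eq_def]
      norm_num [pvDivCheck_2, show n.toNat - 1 - 1 ≠ 0 from by omega]
      have := pvLoop_eq (n.toNat - 3) 0 4 1 0 (by omega) (by omega)
        (by simpa using pvIsOddPrime_3)
      simpa [pvDivCheck_2, show n.toNat - 1 - 1 - 1 = n.toNat - 3 from by omega] using this
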